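-- pv_equiv track=rewrite | github.com/bonhem-studios/-amazon-audit | run_audit.py | detect_report_type_from_headers
-- ===== SOURCE A (Python) =====
-- REPORT_SIGNATURES = {
--     "business_report": {
--         "required": ["(child) asin", "sessions", "buy box", "units ordered",
--                      "ordered product sales", "unit session percentage"],
--         "alt_required": ["(child) asin", "session", "featured offer", "units ordered",
--                         "ordered product sales", "unit session"],
--     },
--     "search_term_report": {
--         "required": ["campaign name", "customer search term", "impressions",
--                      "clicks", "spend"],
--         "alt_required": ["campaign", "search term", "impressions", "clicks", "spend"],
--     },
--     "inventory_health": {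
--         "required": ["asin", "available", "weeks-of-cover", "estimated-excess"],
--         "alt_required": ["asin", "available", "weeks-of-cover-t30",
--                         "units-shipped-t30"],
--     },
--     "customer_returns": {
--         "required": ["return-date", "asin", "quantity", "reason",
--                      "detailed-disposition"],
--         "alt_required": ["return-date", "order-id", "asin", "reason"],
--     },
-- }
--
-- def normalize_header(h: str) -> str:
--     """Lowercase, strip quotes/whitespace for matching."""
--     return h.strip().strip('"').lower()
--
-- def detect_report_type_from_headers(headers: list) -> str:
--     """Detect report type by matching column headers against signatures."""
--     norm = [normalize_header(h) for h in headers]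
--     joined = " | ".join(norm)
--
--     best_match = None
--     best_score = 0
--
--     for rtype, sigs in REPORT_SIGNATURES.items():
--         for sig_key in ["required", "alt_required"]:
--             sig_cols = sigs[sig_key]
--             score = sum(1 for sc in sig_cols if any(sc in nh for nh in norm))
--             if score > best_score:
--                 best_score = score
--                 best_match = rtype
--
--     return best_match if best_score >= 3 else None
-- ===== SOURCE B (Python) =====
-- REPORT_SIGNATURES = {
--     "business_report": {
--         "required": ["(child) asin", "sessions", "buy box", "units ordered",
--                      "ordered product sales", "unit session percentage"],
--         "alt_required": ["(child) asin", "session", "featured offer", "units ordered",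
--                         "ordered product sales", "unit session"],
--     },
--     "search_term_report": {
--         "required": ["campaign name", "customer search term", "impressions",
--                      "clicks", "spend"],
--         "alt_required": ["campaign", "search term", "impressions", "clicks", "spend"],
--     },
--     "inventory_health": {
--         "required": ["asin", "available", "weeks-of-cover", "estimated-excess"],
--         "alt_required": ["asin", "available", "weeks-of-cover-t30",
--                         "units-shipped-t30"],
--     },
--     "customer_returns": {
--         "required": ["return-date", "asin", "quantity", "reason",
--                      "detailed-disposition"],
--         "alt_required": ["return-date", "order-id", "asin", "reason"],
--     },
-- }
--
-- # All distinct signature columns, first-occurrence order.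
-- _ALL_COLS = list(dict.fromkeys(
--     sc for sigs in REPORT_SIGNATURES.values()
--     for key in ("required", "alt_required") for sc in sigs[key]))
--
-- # Flat list of the eight (report type, column list) signature entries.
-- _ENTRIES = [(rtype, sigs[key]) for rtype, sigs in REPORT_SIGNATURES.items()
--             for key in ("required", "alt_required")]
--
-- def normalize_header(h: str) -> str:
--     """Lowercase, strip quotes/whitespace for matching."""
--     return h.strip().strip('"').lower()
--
-- def detect_report_type_from_headers(headers: list) -> str:
--     """Detect report type by matching column headers against signatures."""
--     # One pass over the headers builds the set of matched columns once,
--     # instead of re-scanning all headers for every column of every signature.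
--     matched = set()
--     for h in headers:
--         nh = normalize_header(h)
--         for sc in _ALL_COLS:
--             if sc in nh:
--                 matched.add(sc)
--
--     best_match = None
--     best_score = 0
--     for rtype, cols in _ENTRIES:
--         score = len([sc for sc in cols if sc in matched])
--         if score > best_score:
--             best_score = score
--             best_match = rtype
--     return best_match if best_score >= 3 else None
-- ===== Notes on version B (the rewrite author's own statement) =====
-- stated objective: alternative
-- what changed: B builds the set of matched signature columns in a single pass over the headers (then scores each signature by set membership over a flat entry list), instead of re-scanning the whole header list for every column of every signature entry.
import Mathlib
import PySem

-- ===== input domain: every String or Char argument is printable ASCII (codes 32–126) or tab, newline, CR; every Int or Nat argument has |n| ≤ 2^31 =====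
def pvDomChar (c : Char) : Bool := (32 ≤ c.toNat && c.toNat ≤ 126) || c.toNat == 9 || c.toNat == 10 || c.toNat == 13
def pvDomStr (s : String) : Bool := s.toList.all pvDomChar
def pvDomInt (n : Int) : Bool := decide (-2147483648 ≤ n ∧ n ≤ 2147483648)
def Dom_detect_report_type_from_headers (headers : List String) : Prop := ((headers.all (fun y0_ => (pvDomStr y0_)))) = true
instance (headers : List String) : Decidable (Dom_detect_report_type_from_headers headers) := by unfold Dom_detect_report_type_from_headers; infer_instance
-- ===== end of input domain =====

-- B builds the set of matched signature columns in ONE pass over the headers and scores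
-- each signature by set membership, instead of re-scanning all headers per signature column.

-- shared module constant REPORT_SIGNATURES: (rtype, (required, alt_required)) in dict order
def pvSignatures : List (String × List String × List String) :=
  [ ("business_report",
      (["(child) asin", "sessions", "buy box", "units ordered",
        "ordered product sales", "unit session percentage"],
       ["(child) asin", "session", "featured offer", "units ordered",
        "ordered product sales", "unit session"])),
    ("search_term_report",
      (["campaign name", "customer search term", "impressions", "clicks", "spend"],
       ["campaign", "search term", "impressions", "clicks", "spend"])),
    ("inventory_health",
      (["asin", "available", "weeks-of-cover", "estimated-excess"],
       ["asin", "available", "weeks-of-cover-t30", "units-shipped-t30"])),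
    ("customer_returns",
      (["return-date", "asin", "quantity", "reason", "detailed-disposition"],
       ["return-date", "order-id", "asin", "reason"])) ]

-- shared module helper normalize_header: h.strip().strip('"').lower()
def normalizeHeader (h : String) : String :=
  PySem.Str.lower (PySem.Str.stripChars (PySem.Str.strip h) "\"")

-- ===== PORT A =====
def detect_report_type_from_headers (headers : List String) : Option String :=
  let norm := headers.map normalizeHeader
  let _joined := PySem.Str.join " | " norm   -- A computes 'joined' but never uses it
  let best := pvSignatures.foldl (fun st p =>
      [p.2.1, p.2.2].foldl (fun st sig_cols =>
        let score := sig_cols.foldl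
          (fun acc sc => acc + (if norm.any (fun nh => PySem.Str.isIn sc nh) then 1 else 0))
          (0 : Int)
        if st.2 < score then (some p.1, score) else st) st)
    ((none : Option String), (0 : Int))
  if 3 ≤ best.2 then best.1 else none

-- ===== PORT B =====
-- module constant _ALL_COLS: the distinct signature columns, first-occurrence order
def pvAllCols : List String :=
  PySem.Set.ofList (pvSignatures.foldl (fun acc p => acc ++ p.2.1 ++ p.2.2) [])

-- module constant _ENTRIES: the eight (rtype, cols) signature entries, flat
def pvEntries : List (String × List String) :=
  pvSignatures.flatMap (fun p => [(p.1, p.2.1), (p.1, p.2.2)])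

-- the 'matched' set built by B's single pass over the headers
def matchedSet (headers : List String) : PySem.Set String :=
  headers.foldl (fun m h =>
      let nh := normalizeHeader h
      pvAllCols.foldl (fun m sc => if PySem.Str.isIn sc nh then PySem.Set.add m sc else m) m)
    PySem.Set.empty

def detect_report_type_from_headers_alt (headers : List String) : Option String :=
  let matched := matchedSet headers
  let best := pvEntries.foldl (fun st e =>
      let score := (e.2.countP (fun sc => PySem.Set.contains matched sc) : Int)
      if st.2 < score then (some e.1, score) else st)
    ((none : Option String), (0 : Int))
  if 3 ≤ best.2 then best.1 else none

-- ===== PRECONDITION & SPEC =====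
def Spec_detect_report_type_from_headers (headers : List String) (out : Option String) : Prop := out = detect_report_type_from_headers_alt headers
instance (headers : List String) (out : Option String) : Decidable (Spec_detect_report_type_from_headers headers out) := by unfold Spec_detect_report_type_from_headers; infer_instance

-- ===== CLAIM (what is proved, stated in full; the proofs are below) =====
def Claim_equal_detect_report_type_from_headers : Prop := ∀ (headers : List String), Dom_detect_report_type_from_headers headers → Spec_detect_report_type_from_headers headers (detect_report_type_from_headers headers)

-- ===== LEMMAS AND PROOFS =====

-- the inner per-header fold only adds columns of `cols` whose substring test fires
theorem mem_inner_fold (nh : String) (cols : List String) (m : PySem.Set String) (x : String) :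
    x ∈ cols.foldl (fun m sc => if PySem.Str.isIn sc nh then PySem.Set.add m sc else m) m ↔
      x ∈ m ∨ (x ∈ cols ∧ PySem.Str.isIn x nh = true) := by
  induction cols generalizing m with
  | nil => simp
  | cons c t ih =>
    simp only [List.foldl_cons, ih]
    by_cases hc : PySem.Str.isIn c nh = true
    · simp only [hc, if_pos]
      constructor
      · rintro (hm | h)
        · rcases (PySem.Set.mem_add _ _ _).1 hm with h | h
          · exact Or.inl h
          · subst h; exact Or.inr ⟨List.mem_cons_self .., hc⟩
        · exact Or.inr ⟨List.mem_cons_of_mem _ h.1, h.2⟩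
      · rintro (hm | ⟨hmem, hx⟩)
        · exact Or.inl ((PySem.Set.mem_add _ _ _).2 (Or.inl hm))
        · rcases List.mem_cons.1 hmem with h | h
          · subst h; exact Or.inl ((PySem.Set.mem_add _ _ _).2 (Or.inr rfl))
          · exact Or.inr ⟨h, hx⟩
    · simp only [hc, if_neg, Bool.false_eq_true, not_false_iff]
      constructor
      · rintro (hm | h)
        · exact Or.inl hm
        · exact Or.inr ⟨List.mem_cons_of_mem _ h.1, h.2⟩
      · rintro (hm | ⟨hmem, hx⟩)
        · exact Or.inl hm
        · rcases List.mem_cons.1 hmem with h | h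
          · subst h; exact absurd hx hc
          · exact Or.inr ⟨h, hx⟩

theorem mem_matchedSet (headers : List String) (x : String) :
    x ∈ matchedSet headers ↔
      x ∈ pvAllCols ∧ ∃ h ∈ headers, PySem.Str.isIn x (normalizeHeader h) = true := by
  unfold matchedSet
  suffices H : ∀ (hs : List String) (m : PySem.Set String),
      x ∈ hs.foldl (fun m h =>
          pvAllCols.foldl (fun m sc => if PySem.Str.isIn sc (normalizeHeader h) then PySem.Set.add m sc else m) m) m ↔
        x ∈ m ∨ (x ∈ pvAllCols ∧ ∃ h ∈ hs, PySem.Str.isIn x (normalizeHeader h) = true) by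
    rw [H headers PySem.Set.empty]
    simp [PySem.Set.empty]
  intro hs
  induction hs with
  | nil => simp
  | cons h t ih =>
    intro m
    simp only [List.foldl_cons, ih, mem_inner_fold]
    constructor
    · rintro ((hm | ⟨hc, hx⟩) | ⟨hc, w, hw, hx⟩)
      · exact Or.inl hm
      · exact Or.inr ⟨hc, h, List.mem_cons_self .., hx⟩
      · exact Or.inr ⟨hc, w, List.mem_cons_of_mem _ hw, hx⟩
    · rintro (hm | ⟨hc, w, hw, hx⟩)
      · exact Or.inl (Or.inl hm)
      · rcases List.mem_cons.1 hw with hq | hq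
        · subst hq; exact Or.inl (Or.inr ⟨hc, hx⟩)
        · exact Or.inr ⟨hc, w, hq, hx⟩

theorem contains_matchedSet (headers : List String) (sc : String) (hsc : sc ∈ pvAllCols) :
    PySem.Set.contains (matchedSet headers) sc =
      (headers.map normalizeHeader).any (fun nh => PySem.Str.isIn sc nh) := by
  rcases h : (headers.map normalizeHeader).any (fun nh => PySem.Str.isIn sc nh) with _ | _
  · rw [Bool.eq_false_iff]
    intro hcon
    have hmem := (PySem.Set.contains_iff _ _).1 hcon
    rcases (mem_matchedSet headers sc).1 hmem with ⟨_, w, hw, hx⟩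
    have : (headers.map normalizeHeader).any (fun nh => PySem.Str.isIn sc nh) = true := by
      simp only [List.any_eq_true, List.mem_map]
      exact ⟨normalizeHeader w, ⟨w, hw, rfl⟩, hx⟩
    rw [h] at this; exact Bool.false_ne_true this
  · apply (PySem.Set.contains_iff _ _).2
    apply (mem_matchedSet headers sc).2
    refine ⟨hsc, ?_⟩
    simp only [List.any_eq_true, List.mem_map] at h
    rcases h with ⟨nh, ⟨w, hw, rfl⟩, hx⟩
    exact ⟨w, hw, hx⟩

-- a foldl-sum of 0/1 indicators is a countP
theorem foldl_indicator (p : String → Bool) (cols : List String) (n : Int) :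
    cols.foldl (fun acc sc => acc + (if p sc then 1 else 0)) n = n + cols.countP p := by
  induction cols generalizing n with
  | nil => simp
  | cons c t ih =>
    simp only [List.foldl_cons, ih, List.countP_cons]
    by_cases hc : p c = true
    · simp only [hc, if_pos]; omega
    · simp only [hc, Bool.false_eq_true, if_neg, not_false_iff]; omega

-- A's per-signature score (rescan all headers per column) equals B's (membership in matchedSet)
theorem score_bridge (headers : List String) (cols : List String)
    (hsub : ∀ sc ∈ cols, sc ∈ pvAllCols) :
    cols.foldl
        (fun acc sc => acc + (if (headers.map normalizeHeader).any (fun nh => PySem.Str.isIn sc nh) then 1 else 0))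
        (0 : Int)
      = (cols.countP (fun sc => PySem.Set.contains (matchedSet headers) sc) : Int) := by
  rw [foldl_indicator, zero_add]
  congr 1
  apply List.countP_congr
  intro sc hmem
  rw [contains_matchedSet headers sc (hsub sc hmem)]

-- the nested selection loop over signatures (scores f) equals the flat loop over entries (scores g)
theorem sel_eq (f g : List String → Int) (l : List (String × List String × List String))
    (hfg : ∀ p ∈ l, f p.2.1 = g p.2.1 ∧ f p.2.2 = g p.2.2) (st : Option String × Int) :
    l.foldl (fun st p =>
        [p.2.1, p.2.2].foldl (fun st cols => if st.2 < f cols then (some p.1, f cols) else st) st) st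
      = (l.flatMap (fun p => [(p.1, p.2.1), (p.1, p.2.2)])).foldl
          (fun st e => if st.2 < g e.2 then (some e.1, g e.2) else st) st := by
  induction l generalizing st with
  | nil => rfl
  | cons p t ih =>
    simp only [List.foldl_cons, List.flatMap_cons, List.cons_append, List.nil_append,
      List.foldl_nil]
    rw [(hfg p (List.mem_cons_self ..)).1, (hfg p (List.mem_cons_self ..)).2]
    exact ih (fun q hq => hfg q (List.mem_cons_of_mem _ hq)) _

-- every column of every signature entry is in pvAllCols, so score_bridge applies to all eight
set_option maxRecDepth 4000 in
theorem hfg_all (headers : List String) : ∀ p ∈ pvSignatures,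
    (fun cols => cols.foldl
        (fun acc sc => acc + (if (headers.map normalizeHeader).any (fun nh => PySem.Str.isIn sc nh) then 1 else 0))
        (0 : Int)) p.2.1
      = (fun cols => (cols.countP (fun sc => PySem.Set.contains (matchedSet headers) sc) : Int)) p.2.1 ∧
    (fun cols => cols.foldl
        (fun acc sc => acc + (if (headers.map normalizeHeader).any (fun nh => PySem.Str.isIn sc nh) then 1 else 0))
        (0 : Int)) p.2.2
      = (fun cols => (cols.countP (fun sc => PySem.Set.contains (matchedSet headers) sc) : Int)) p.2.2 := by
  intro p hp
  fin_cases hp <;>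
    exact ⟨score_bridge headers _ (by decide), score_bridge headers _ (by decide)⟩

-- ===== VERDICT (by name: the statement is the Claim_ definition above) =====
theorem detect_report_type_from_headers_spec : Claim_equal_detect_report_type_from_headers := by
  intro headers _
  unfold Spec_detect_report_type_from_headers
  unfold detect_report_type_from_headers detect_report_type_from_headers_alt pvEntries
  have key := sel_eq
    (fun cols => cols.foldl
        (fun acc sc => acc + (if (headers.map normalizeHeader).any (fun nh => PySem.Str.isIn sc nh) then 1 else 0))
        (0 : Int))
    (fun cols => (cols.countP (fun sc => PySem.Set.contains (matchedSet headers) sc) : Int))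
    pvSignatures (hfg_all headers) ((none : Option String), (0 : Int))
  simp only [key]
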